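-- pv_equiv track=rewrite | github.com/ng0200731/video_check | tools/processor.py | find_label_columns
-- ===== SOURCE A (Python) =====
-- def find_label_columns(strips, frame_w):
--     """Return label columns sorted by width (widest first)."""
--     edges = [0]
--     for s, e in sorted(strips):
--         edges.append(s)
--         edges.append(e)
--     edges.append(frame_w)
--
--     cols = []
--     margin = 10
--     for i in range(0, len(edges) - 1, 2):
--         x1 = edges[i] + margin
--         x2 = edges[i + 1] - margin
--         if x2 - x1 > 40:
--             cols.append((x1, x2))
--     cols.sort(key=lambda c: c[1] - c[0], reverse=True)
--     return cols
-- ===== SOURCE B (Python) =====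
-- def find_label_columns(strips, frame_w):
--     """Return label columns sorted by width (widest first).
--
--     Single pass with a running previous boundary instead of building a flat
--     edges list and indexing it with a stride-2 loop.
--     """
--     margin = 10
--     cols = []
--     prev = 0
--     for s, e in sorted(strips):
--         x1 = prev + margin
--         x2 = s - margin
--         if x2 - x1 > 40:
--             cols.append((x1, x2))
--         prev = e
--     x1 = prev + margin
--     x2 = frame_w - margin
--     if x2 - x1 > 40:
--         cols.append((x1, x2))
--     return sorted(cols, key=lambda c: c[1] - c[0], reverse=True)
-- ===== Notes on version B (the rewrite author's own statement) =====
-- stated objective: simpler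
-- what changed: B replaces A's intermediate flat edges list and its stride-by-2 index loop with a single pass over the sorted strips that keeps a running previous boundary and emits each gap column directly.
import Mathlib
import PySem

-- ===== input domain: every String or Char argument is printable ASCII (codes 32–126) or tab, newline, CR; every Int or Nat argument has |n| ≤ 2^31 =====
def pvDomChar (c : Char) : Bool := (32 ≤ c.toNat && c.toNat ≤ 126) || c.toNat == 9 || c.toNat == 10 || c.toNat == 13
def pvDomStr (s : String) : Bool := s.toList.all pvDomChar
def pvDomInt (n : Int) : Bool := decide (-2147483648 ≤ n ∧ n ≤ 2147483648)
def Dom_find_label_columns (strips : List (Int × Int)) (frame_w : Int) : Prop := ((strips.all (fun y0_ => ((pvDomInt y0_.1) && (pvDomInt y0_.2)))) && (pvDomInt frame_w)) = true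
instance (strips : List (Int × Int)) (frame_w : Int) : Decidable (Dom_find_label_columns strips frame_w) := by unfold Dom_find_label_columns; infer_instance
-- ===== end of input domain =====

-- B replaces A's flat edges list + stride-2 index loop by a single running-prev pass
-- over the sorted strips (objective: simpler). Return values proved equal on all inputs.

-- ===== PORT A =====
def find_label_columns (strips : List (Int × Int)) (frame_w : Int) : List (Int × Int) :=
  let edges :=
    ((PySem.List.sorted2 strips (fun p => p.1) (fun p => p.2)).foldl
      (fun acc p => acc ++ [p.1] ++ [p.2]) [(0 : Int)]) ++ [frame_w]
  let margin : Int := 10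
  let cols :=
    (PySem.List.pyRange 0 ((edges.length : Int) - 1) 2).foldl
      (fun acc i =>
        let x1 := PySem.List.pyGetD edges i 0 + margin
        let x2 := PySem.List.pyGetD edges (i + 1) 0 - margin
        if x2 - x1 > 40 then acc ++ [(x1, x2)] else acc) []
  PySem.List.sorted cols (fun c => c.2 - c.1) true

-- ===== PORT B =====
def find_label_columns_alt (strips : List (Int × Int)) (frame_w : Int) : List (Int × Int) :=
  let margin : Int := 10
  let st :=
    (PySem.List.sorted2 strips (fun p => p.1) (fun p => p.2)).foldl
      (fun (st : Int × List (Int × Int)) p =>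
        let x1 := st.1 + margin
        let x2 := p.1 - margin
        (p.2, if x2 - x1 > 40 then st.2 ++ [(x1, x2)] else st.2))
      (0, [])
  let x1 := st.1 + margin
  let x2 := frame_w - margin
  let cols := if x2 - x1 > 40 then st.2 ++ [(x1, x2)] else st.2
  PySem.List.sorted cols (fun c => c.2 - c.1) true

-- ===== PRECONDITION & SPEC =====
def Spec_find_label_columns (strips : List (Int × Int)) (frame_w : Int) (out : List (Int × Int)) : Prop := out = find_label_columns_alt strips frame_w
instance (strips : List (Int × Int)) (frame_w : Int) (out : List (Int × Int)) : Decidable (Spec_find_label_columns strips frame_w out) := by unfold Spec_find_label_columns; infer_instance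

-- ===== CLAIM (what is proved, stated in full; the proofs are below) =====
def Claim_equal_find_label_columns : Prop := ∀ (strips : List (Int × Int)) (frame_w : Int), Dom_find_label_columns strips frame_w → Spec_find_label_columns strips frame_w (find_label_columns strips frame_w)

-- ===== LEMMAS AND PROOFS =====

-- One step of the gap test: keep (x1, x2) when wide enough.
def pvStep (a b : Int) (acc : List (Int × Int)) : List (Int × Int) :=
  if (b - 10) - (a + 10) > 40 then acc ++ [(a + 10, b - 10)] else acc

lemma pv_edges_eq (ss : List (Int × Int)) (init : List Int) :
    ss.foldl (fun acc p => acc ++ [p.1] ++ [p.2]) init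
      = init ++ ss.flatMap (fun p => [p.1, p.2]) := by
  induction ss generalizing init with
  | nil => simp
  | cons h t ih => simp [List.foldl_cons, List.flatMap]

-- Stride-2 indexing into prev :: flat(ss) ++ [w] is the running-prev pass over ss.
lemma pv_stride (ss : List (Int × Int)) :
    ∀ (prev w : Int) (acc : List (Int × Int)),
      (List.range (ss.length + 1)).foldl
        (fun a k =>
          pvStep ((prev :: ss.flatMap (fun p => [p.1, p.2]) ++ [w]).getD (2 * k) 0)
                 ((prev :: ss.flatMap (fun p => [p.1, p.2]) ++ [w]).getD (2 * k + 1) 0) a)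
        acc
      = (let st := ss.foldl
            (fun (st : Int × List (Int × Int)) p =>
              (p.2, pvStep st.1 p.1 st.2)) (prev, acc)
         pvStep st.1 w st.2) := by
  induction ss with
  | nil =>
      intro prev w acc
      simp [List.range_succ, pvStep]
  | cons h t ih =>
      intro prev w acc
      rw [List.range_succ_eq_map]
      simp only [List.foldl_cons, List.foldl_map, List.flatMap_cons, List.length_cons]
      have hgd : ∀ (k : Nat) (l : List Int) (x y : Int),
          (x :: y :: l).getD (2 * (k + 1)) 0 = l.getD (2 * k) 0 := by
        intro k l x y
        have : 2 * (k + 1) = (2 * k) + 1 + 1 := by omega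
        simp [this]
      have hgd' : ∀ (k : Nat) (l : List Int) (x y : Int),
          (x :: y :: l).getD (2 * (k + 1) + 1) 0 = l.getD (2 * k + 1) 0 := by
        intro k l x y
        have : 2 * (k + 1) + 1 = (2 * k + 1) + 1 + 1 := by omega
        simp [this]
      have h0 : (prev :: (h.1 :: h.2 :: t.flatMap (fun p => [p.1, p.2])) ++ [w]).getD 0 0 = prev := by simp
      have h1 : (prev :: (h.1 :: h.2 :: t.flatMap (fun p => [p.1, p.2])) ++ [w]).getD 1 0 = h.1 := by simp
      calc (List.range (t.length + 1)).foldl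
              (fun a k =>
                pvStep ((prev :: (h.1 :: h.2 :: t.flatMap (fun p => [p.1, p.2])) ++ [w]).getD (2 * (k + 1)) 0)
                       ((prev :: (h.1 :: h.2 :: t.flatMap (fun p => [p.1, p.2])) ++ [w]).getD (2 * (k + 1) + 1) 0) a)
              (pvStep ((prev :: (h.1 :: h.2 :: t.flatMap (fun p => [p.1, p.2])) ++ [w]).getD 0 0)
                      ((prev :: (h.1 :: h.2 :: t.flatMap (fun p => [p.1, p.2])) ++ [w]).getD 1 0) acc)
          = (List.range (t.length + 1)).foldl
              (fun a k =>
                pvStep ((h.2 :: t.flatMap (fun p => [p.1, p.2]) ++ [w]).getD (2 * k) 0)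
                       ((h.2 :: t.flatMap (fun p => [p.1, p.2]) ++ [w]).getD (2 * k + 1) 0) a)
              (pvStep prev h.1 acc) := by
              rw [h0, h1]
              apply PySem.List.foldl_congr_mem
              intro a k _
              rw [show (prev :: (h.1 :: h.2 :: t.flatMap (fun p => [p.1, p.2])) ++ [w])
                    = prev :: h.1 :: (h.2 :: t.flatMap (fun p => [p.1, p.2]) ++ [w]) by simp,
                  hgd, hgd']
        _ = _ := by rw [ih h.2 w (pvStep prev h.1 acc)]

-- ===== VERDICT (by name: the statement is the Claim_ definition above) =====
theorem find_label_columns_spec : Claim_equal_find_label_columns := by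
  intro strips frame_w _
  unfold Spec_find_label_columns find_label_columns find_label_columns_alt
  set ss := PySem.List.sorted2 strips (fun p => p.1) (fun p => p.2) with hss
  simp only []
  congr 1
  rw [pv_edges_eq]
  have hlen : ((([(0:Int)] ++ ss.flatMap (fun p => [p.1, p.2])) ++ [frame_w]).length : Int)
      = 2 * (ss.length : Int) + 2 := by
    simp [List.length_flatMap]
    ring
  rw [hlen, PySem.List.pyRange_of_pos 0 (2 * (ss.length : Int) + 2 - 1) (by omega),
      if_pos (by omega : (0:Int) < 2 * (ss.length : Int) + 2 - 1)]
  have h2 : (2 * (ss.length : Int) + 2 - 1 - 0 + 2 - 1) / 2 = (ss.length : Int) + 1 := by omega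
  rw [h2, show ((ss.length : Int) + 1).toNat = ss.length + 1 by omega, List.foldl_map]
  have hfn : ∀ (a : List (Int × Int)) (k : Nat), k ∈ List.range (ss.length + 1) →
      (if PySem.List.pyGetD (([(0:Int)] ++ ss.flatMap (fun p => [p.1, p.2])) ++ [frame_w]) ((0 : Int) + 2 * (k : Int) + 1) 0 - 10
            - (PySem.List.pyGetD (([(0:Int)] ++ ss.flatMap (fun p => [p.1, p.2])) ++ [frame_w]) ((0 : Int) + 2 * (k : Int)) 0 + 10) > 40
       then a ++ [(PySem.List.pyGetD (([(0:Int)] ++ ss.flatMap (fun p => [p.1, p.2])) ++ [frame_w]) ((0 : Int) + 2 * (k : Int)) 0 + 10,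
                   PySem.List.pyGetD (([(0:Int)] ++ ss.flatMap (fun p => [p.1, p.2])) ++ [frame_w]) ((0 : Int) + 2 * (k : Int) + 1) 0 - 10)]
       else a)
      = pvStep (((0:Int) :: ss.flatMap (fun p => [p.1, p.2]) ++ [frame_w]).getD (2 * k) 0)
               (((0:Int) :: ss.flatMap (fun p => [p.1, p.2]) ++ [frame_w]).getD (2 * k + 1) 0) a := by
    intro a k _
    have e1 : (0 : Int) + 2 * (k : Int) = ((2 * k : Nat) : Int) := by push_cast; ring
    simp only [e1]
    have e2 : ((2 * k : Nat) : Int) + 1 = ((2 * k + 1 : Nat) : Int) := by push_cast; ring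
    simp only [e2, PySem.List.pyGetD_natCast, List.cons_append, List.nil_append]
    simp only [pvStep, List.getD, gt_iff_lt]
  refine Eq.trans (PySem.List.foldl_congr_mem _ _ _ _ hfn) ?_
  rw [pv_stride]
  simp only [pvStep, gt_iff_lt]
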